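-- pv_equiv track=rewrite | github.com/maux96/DAA-Problema-3 | heur.py | get_all_intersections_lens_sorted
-- ===== SOURCE A (Python) =====
-- def instersections_len(prop, prop_list, used_sets):
--     result = 0
--     intersections = []
--     for index, p in enumerate(prop_list):
--         if p != prop and not used_sets[index]:
--             if len(p & prop) > 0:
--                 result +=1
--                 intersections.append(index)
--     return result, intersections
--
-- def get_all_intersections_lens_sorted(prop_list, used_sets):
--     sorted_list=[]
--     for index, prop in enumerate(prop_list):
--         if not used_sets[index]:
--             result, intersections=instersections_len(prop, prop_list, used_sets)
--             sorted_list.append(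
--                 (result,index,intersections))
--     sorted_list.sort()
--     return sorted_list
-- ===== SOURCE B (Python) =====
-- def get_all_intersections_lens_sorted(prop_list, used_sets):
--     # Inverted index element -> list of unused set indices containing it.
--     buckets = {}
--     for i, p in enumerate(prop_list):
--         if not used_sets[i]:
--             for e in p:
--                 buckets.setdefault(e, []).append(i)
--     result = []
--     for i, p in enumerate(prop_list):
--         if not used_sets[i]:
--             cand = set()
--             for e in p:
--                 cand.update(buckets[e])
--             inter = sorted(j for j in cand if prop_list[j] != p)
--             result.append((len(inter), i, inter))
--     result.sort()
--     return result
-- ===== Notes on version B (the rewrite author's own statement) =====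
-- stated objective: faster
-- what changed: Replaces A's all-pairs scan (for each unused set, rescan every other set and test intersection) by an inverted index element->unused-set-indices built once; each set's overlap list is the union of its elements' buckets, deduplicated via a set, filtered by set-inequality and sorted.
import Mathlib
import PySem

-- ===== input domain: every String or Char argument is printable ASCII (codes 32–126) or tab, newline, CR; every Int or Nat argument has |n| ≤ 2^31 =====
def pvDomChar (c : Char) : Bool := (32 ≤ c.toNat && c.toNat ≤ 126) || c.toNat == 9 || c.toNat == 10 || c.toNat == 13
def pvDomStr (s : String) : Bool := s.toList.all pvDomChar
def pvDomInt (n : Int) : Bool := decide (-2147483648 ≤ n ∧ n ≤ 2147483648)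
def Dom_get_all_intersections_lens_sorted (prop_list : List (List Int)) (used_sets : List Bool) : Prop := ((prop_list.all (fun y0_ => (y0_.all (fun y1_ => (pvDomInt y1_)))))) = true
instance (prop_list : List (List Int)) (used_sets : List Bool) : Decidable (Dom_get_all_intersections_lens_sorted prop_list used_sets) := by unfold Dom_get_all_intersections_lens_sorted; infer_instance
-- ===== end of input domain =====

-- B replaces A's all-pairs rescans by an inverted index element → unused-set-indices (objective: faster, asymptotic).
-- Inner lists stand for Python sets: set inequality / nonempty intersection are tested by membership, exact for any representative list.

-- ===== PORT A =====
-- Python's `p != prop` on sets (value inequality), exact via mutual containment.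
def pvSetNe (p q : List Int) : Bool := !(p.all (fun x => q.contains x) && q.all (fun x => p.contains x))
-- Python's `len(p & prop) > 0`, exact: a common element exists.
def pvHasCommon (p q : List Int) : Bool := p.any (fun x => q.contains x)

def instersections_len (prop : List Int) (prop_list : List (List Int)) (used_sets : List Bool) : Int × List Int :=
  -- pyGetD is exact under Pre_ (every index accessed is < used_sets.length)
  (PySem.List.enumerate prop_list).foldl
    (fun (st : Int × List Int) ip =>
      if pvSetNe ip.2 prop && !(PySem.List.pyGetD used_sets ip.1 false) && pvHasCommon ip.2 prop
      then (st.1 + 1, st.2 ++ [ip.1]) else st)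
    (0, [])

def get_all_intersections_lens_sorted (prop_list : List (List Int)) (used_sets : List Bool) : List (Int × Int × List Int) :=
  let sorted_list :=
    (PySem.List.enumerate prop_list).foldl
      (fun acc ip =>
        if !(PySem.List.pyGetD used_sets ip.1 false) then
          acc ++ [((instersections_len ip.2 prop_list used_sets).1, ip.1,
                   (instersections_len ip.2 prop_list used_sets).2)]
        else acc)
      []
  -- Python sorts the triples lexicographically; the second components are distinct indices,
  -- so the list sort is exactly the stable sort by (result, index).
  PySem.List.sorted2 sorted_list (fun t => t.1) (fun t => t.2.1)

-- ===== PORT B =====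
-- buckets[e] = list of unused indices i with e ∈ prop_list[i] (`setdefault(e, []).append(i)` = modify).
def pvBuckets (prop_list : List (List Int)) (used_sets : List Bool) : PySem.Dict Int (List Int) :=
  (PySem.List.enumerate prop_list).foldl
    (fun d ip =>
      if !(PySem.List.pyGetD used_sets ip.1 false) then
        ip.2.foldl (fun d e => d.modify e [] (· ++ [ip.1])) d
      else d)
    PySem.Dict.empty

-- one row of B's result loop: candidates from the buckets, dedup (set), filter by set-inequality, sort
def pvEntry (prop_list : List (List Int)) (buckets : PySem.Dict Int (List Int)) (ip : Int × List Int) : Int × Int × List Int :=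
  let cand : PySem.Set Int :=
    ip.2.foldl (fun s e => PySem.Set.update s (buckets.getD e [])) PySem.Set.empty
  let inter :=
    PySem.List.sorted (cand.filter (fun j => pvSetNe (PySem.List.pyGetD prop_list j []) ip.2))
      (fun x => x) false
  ((inter.length : Int), ip.1, inter)

def get_all_intersections_lens_sorted_alt (prop_list : List (List Int)) (used_sets : List Bool) : List (Int × Int × List Int) :=
  let buckets := pvBuckets prop_list used_sets
  let result :=
    (PySem.List.enumerate prop_list).foldl
      (fun acc ip =>
        if !(PySem.List.pyGetD used_sets ip.1 false) then
          acc ++ [pvEntry prop_list buckets ip]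
        else acc)
      []
  PySem.List.sorted2 result (fun t => t.1) (fun t => t.2.1)

-- ===== PRECONDITION & SPEC =====
-- Pre_ excludes exactly the inputs where the Python A raises IndexError (used_sets shorter than prop_list).
def Pre_get_all_intersections_lens_sorted (prop_list : List (List Int)) (used_sets : List Bool) : Prop :=
  prop_list.length ≤ used_sets.length
instance (prop_list : List (List Int)) (used_sets : List Bool) : Decidable (Pre_get_all_intersections_lens_sorted prop_list used_sets) := by unfold Pre_get_all_intersections_lens_sorted; infer_instance
def pvWitness_get_all_intersections_lens_sorted : List (List Int) × List Bool :=
  ([[1, 2], [2, 3], [5]], [false, false, false])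

def Spec_get_all_intersections_lens_sorted (prop_list : List (List Int)) (used_sets : List Bool) (out : List (Int × Int × List Int)) : Prop := out = get_all_intersections_lens_sorted_alt prop_list used_sets
instance (prop_list : List (List Int)) (used_sets : List Bool) (out : List (Int × Int × List Int)) : Decidable (Spec_get_all_intersections_lens_sorted prop_list used_sets out) := by unfold Spec_get_all_intersections_lens_sorted; infer_instance

-- ===== CLAIM (what is proved, stated in full; the proofs are below) =====
def Claim_equal_get_all_intersections_lens_sorted : Prop := ∀ (prop_list : List (List Int)) (used_sets : List Bool), Dom_get_all_intersections_lens_sorted prop_list used_sets → Pre_get_all_intersections_lens_sorted prop_list used_sets → Spec_get_all_intersections_lens_sorted prop_list used_sets (get_all_intersections_lens_sorted prop_list used_sets)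

-- ===== LEMMAS AND PROOFS =====

-- membership in a bucket after appending i under every element of p
theorem pv_mem_getD_modifyFold (p : List Int) (d : PySem.Dict Int (List Int)) (i c j : Int) :
    (j ∈ (p.foldl (fun d e => d.modify e [] (· ++ [i])) d).getD c []) ↔
      j ∈ d.getD c [] ∨ (c ∈ p ∧ j = i) := by
  induction p generalizing d with
  | nil => simp
  | cons e p ih =>
    simp only [List.foldl_cons, ih, PySem.Dict.getD_modify, List.mem_cons]
    by_cases h : c = e
    · subst h; simp; tauto
    · simp [h]

-- membership in a bucket of the full inverted index
theorem pv_mem_getD_bucketFold (c : Int × List Int → Bool) (l : List (Int × List Int))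
    (d : PySem.Dict Int (List Int)) (e j : Int) :
    (j ∈ (l.foldl (fun d ip => if c ip then ip.2.foldl (fun d x => d.modify x [] (· ++ [ip.1])) d else d) d).getD e []) ↔
      j ∈ d.getD e [] ∨ ∃ ip ∈ l, c ip = true ∧ e ∈ ip.2 ∧ j = ip.1 := by
  induction l generalizing d with
  | nil => simp
  | cons hd tl ih =>
    simp only [List.foldl_cons, List.mem_cons]
    by_cases h : c hd
    · rw [if_pos h, ih, pv_mem_getD_modifyFold]
      constructor
      · rintro ((h1 | ⟨h1, rfl⟩) | ⟨ip, hip, hc, he, rfl⟩)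
        · exact Or.inl h1
        · exact Or.inr ⟨hd, Or.inl rfl, h, h1, rfl⟩
        · exact Or.inr ⟨ip, Or.inr hip, hc, he, rfl⟩
      · rintro (h1 | ⟨ip, (rfl | hip), hc, he, rfl⟩)
        · exact Or.inl (Or.inl h1)
        · exact Or.inl (Or.inr ⟨he, rfl⟩)
        · exact Or.inr ⟨ip, hip, hc, he, rfl⟩
    · rw [if_neg h, ih]
      constructor
      · rintro (h1 | ⟨ip, hip, hc, he, rfl⟩)
        · exact Or.inl h1
        · exact Or.inr ⟨ip, Or.inr hip, hc, he, rfl⟩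
      · rintro (h1 | ⟨ip, (rfl | hip), hc, he, rfl⟩)
        · exact Or.inl h1
        · exact absurd hc (by simp [h])
        · exact Or.inr ⟨ip, hip, hc, he, rfl⟩

-- membership in the candidate set (union of buckets)
theorem pv_mem_updateFold (g : Int → List Int) (p : List Int) (s : PySem.Set Int) (j : Int) :
    (j ∈ p.foldl (fun s e => PySem.Set.update s (g e)) s) ↔ j ∈ s ∨ ∃ e ∈ p, j ∈ g e := by
  induction p generalizing s with
  | nil => simp
  | cons e p ih =>
    simp only [List.foldl_cons, ih, PySem.Set.mem_update, List.mem_cons]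
    constructor
    · rintro ((h1 | h1) | ⟨e', he', hj⟩)
      · exact Or.inl h1
      · exact Or.inr ⟨e, Or.inl rfl, h1⟩
      · exact Or.inr ⟨e', Or.inr he', hj⟩
    · rintro (h1 | ⟨e', (rfl | he'), hj⟩)
      · exact Or.inl (Or.inl h1)
      · exact Or.inl (Or.inr hj)
      · exact Or.inr ⟨e', he', hj⟩

theorem pv_nodup_updateFold (g : Int → List Int) (p : List Int) (s : PySem.Set Int) (h : s.Nodup) :
    (p.foldl (fun s e => PySem.Set.update s (g e)) s).Nodup := by
  induction p generalizing s with
  | nil => exact h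
  | cons e p ih => exact ih _ (PySem.Set.nodup_update _ _ h)

-- closed form of A's inner counting loop
theorem pv_innerA_foldl (c : Int × List Int → Bool) (l : List (Int × List Int)) (a : Int) (acc : List Int) :
    l.foldl (fun (st : Int × List Int) ip => if c ip then (st.1 + 1, st.2 ++ [ip.1]) else st) (a, acc)
      = (a + ((l.filter c).length : Int), acc ++ (l.filter c).map (·.1)) := by
  induction l generalizing a acc with
  | nil => simp
  | cons hd tl ih =>
    by_cases h : c hd
    · simp only [List.foldl_cons, if_pos h, ih, List.filter_cons_of_pos h, List.length_cons,
        List.map_cons, List.append_assoc, List.singleton_append]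
      rw [Prod.mk.injEq]; refine ⟨by push_cast; ring, rfl⟩
    · simp [h, ih]

-- A's row and B's row agree at every enumerated index
theorem pv_entry_eq (pl : List (List Int)) (us : List Bool) (ip : Int × List Int)
    (hip : ip ∈ PySem.List.enumerate pl) :
    ((instersections_len ip.2 pl us).1, ip.1, (instersections_len ip.2 pl us).2)
      = pvEntry pl (pvBuckets pl us) ip := by
  obtain ⟨k, hk, rfl⟩ := (PySem.List.mem_enumerate_iff _ _ _).mp hip
  unfold instersections_len pvEntry pvBuckets
  rw [pv_innerA_foldl]
  simp only [zero_add]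
  set cA : Int × List Int → Bool := fun ip' =>
    pvSetNe ip'.2 pl[k] && !(PySem.List.pyGetD us ip'.1 false) && pvHasCommon ip'.2 pl[k] with hcA
  set LA : List Int := ((PySem.List.enumerate pl).filter cA).map (·.1) with hLA
  set candF : List Int :=
    (pl[k].foldl (fun s e =>
        PySem.Set.update s
          (((PySem.List.enumerate pl).foldl
              (fun d ip => if !(PySem.List.pyGetD us ip.1 false) then
                ip.2.foldl (fun d e => d.modify e [] (· ++ [ip.1])) d else d)
              PySem.Dict.empty).getD e []))
        PySem.Set.empty).filter
      (fun j => pvSetNe (PySem.List.pyGetD pl j []) pl[k]) with hcandF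
  have hpairLA : LA.Pairwise (· < ·) := by
    rw [hLA, List.pairwise_map]
    exact (PySem.List.pairwise_lt_enumerate pl 0).filter _
  have hnodupLA : LA.Nodup := hpairLA.imp (fun h => ne_of_lt h)
  have hnodupCF : candF.Nodup := by
    rw [hcandF]
    exact (pv_nodup_updateFold _ _ _ List.nodup_nil).filter _
  have hmem : ∀ j, j ∈ LA ↔ j ∈ candF := by
    intro j
    rw [hLA, hcandF, List.mem_filter, pv_mem_updateFold]
    simp only [List.mem_map, List.mem_filter, PySem.Dict.getD_empty, PySem.Set.empty,
      List.not_mem_nil, false_or, pv_mem_getD_bucketFold]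
    constructor
    · rintro ⟨a, ⟨ha, hca⟩, rfl⟩
      obtain ⟨k', hk', rfl⟩ := (PySem.List.mem_enumerate_iff _ _ _).mp ha
      rw [hcA] at hca
      simp only [Bool.and_eq_true] at hca
      obtain ⟨⟨hne, hun⟩, hcom⟩ := hca
      simp only [pvHasCommon, List.any_eq_true, List.contains_iff_mem] at hcom
      obtain ⟨x, hx1, hx2⟩ := hcom
      refine ⟨⟨x, hx2, (0 + ↑k', pl[k']), ha, hun, hx1, rfl⟩, ?_⟩
      have : PySem.List.pyGetD pl ((0:Int) + ↑k') [] = pl[k'] := by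
        simp [PySem.List.pyGetD_natCast, List.getD_eq_getElem?_getD, hk']
      rw [this]; exact hne
    · rintro ⟨⟨e, he, a, ha, hun, hea, rfl⟩, hne⟩
      obtain ⟨k', hk', rfl⟩ := (PySem.List.mem_enumerate_iff _ _ _).mp ha
      have hget : PySem.List.pyGetD pl ((0:Int) + ↑k') [] = pl[k'] := by
        simp [PySem.List.pyGetD_natCast, List.getD_eq_getElem?_getD, hk']
      refine ⟨(0 + ↑k', pl[k']), ⟨ha, ?_⟩, rfl⟩
      rw [hcA]
      simp only [Bool.and_eq_true]
      refine ⟨⟨?_, hun⟩, ?_⟩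
      · rw [hget] at hne; exact hne
      · simp only [pvHasCommon, List.any_eq_true, List.contains_iff_mem]
        exact ⟨e, hea, he⟩
  have hLB : PySem.List.sorted candF (fun x => x) false = LA :=
    PySem.List.sorted_eq_of_perm_of_pairwise_lt candF LA (fun x => x)
      ((List.perm_ext_iff_of_nodup hnodupLA hnodupCF).mpr hmem) hpairLA
  rw [hLB, hLA]
  simp [List.length_map]

-- the two result lists agree before the final sort
theorem pv_rows_eq (pl : List (List Int)) (us : List Bool) :
    (PySem.List.enumerate pl).foldl
      (fun acc ip =>
        if !(PySem.List.pyGetD us ip.1 false) then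
          acc ++ [((instersections_len ip.2 pl us).1, ip.1, (instersections_len ip.2 pl us).2)]
        else acc) []
    = (PySem.List.enumerate pl).foldl
      (fun acc ip =>
        if !(PySem.List.pyGetD us ip.1 false) then
          acc ++ [pvEntry pl (pvBuckets pl us) ip]
        else acc) [] := by
  have hA := PySem.List.foldl_append_if
    (fun ip : Int × List Int => !(PySem.List.pyGetD us ip.1 false))
    (fun ip : Int × List Int => ((instersections_len ip.2 pl us).1, ip.1, (instersections_len ip.2 pl us).2))
    (PySem.List.enumerate pl) []
  have hB := PySem.List.foldl_append_if
    (fun ip : Int × List Int => !(PySem.List.pyGetD us ip.1 false))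
    (fun ip : Int × List Int => pvEntry pl (pvBuckets pl us) ip)
    (PySem.List.enumerate pl) []
  simp only [] at hA hB
  rw [hA, hB, List.nil_append, List.nil_append]
  exact List.map_congr_left (fun a ha => pv_entry_eq pl us a (List.mem_of_mem_filter ha))

-- ===== VERDICT (by name: the statement is the Claim_ definition above) =====
theorem get_all_intersections_lens_sorted_spec : Claim_equal_get_all_intersections_lens_sorted := by
  intro prop_list used_sets _hdom _hpre
  unfold Spec_get_all_intersections_lens_sorted
  unfold get_all_intersections_lens_sorted get_all_intersections_lens_sorted_alt
  rw [pv_rows_eq]
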